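-- pv_equiv track=rewrite | github.com/CSC-3380-Spring-2025/Team-19 | src/Word_Ladder.py | hide_words
-- ===== SOURCE A (Python) =====
-- def hide_words(word_list: list[str]) -> list[str]:
--     word: int = 0
--     new_list: list[str] = word_list.copy()
--     while word < len(word_list)-1:
--         blank_word: list[str] = list(word_list[word+1])
--         index: int = 1
--         while index <= len(blank_word) - 1:
--             blank_word[index] = "_"
--             index += 1
--             new_list[word+1] = "".join(blank_word)
--         word += 1
--     return new_list
-- ===== SOURCE B (Python) =====
-- def hide_words(word_list: list[str]) -> list[str]:
--     return [w if i == 0 else w[:1] + "_" * (len(w) - 1)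
--             for i, w in enumerate(word_list)]
-- ===== Notes on version B (the rewrite author's own statement) =====
-- stated objective: simpler
-- what changed: Replaces A's copy-then-mutate outer index loop with nested per-character overwrite-and-rejoin loop by a single enumerate comprehension masking each later word in closed form w[:1] + '_'*(len(w)-1).
import Mathlib
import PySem

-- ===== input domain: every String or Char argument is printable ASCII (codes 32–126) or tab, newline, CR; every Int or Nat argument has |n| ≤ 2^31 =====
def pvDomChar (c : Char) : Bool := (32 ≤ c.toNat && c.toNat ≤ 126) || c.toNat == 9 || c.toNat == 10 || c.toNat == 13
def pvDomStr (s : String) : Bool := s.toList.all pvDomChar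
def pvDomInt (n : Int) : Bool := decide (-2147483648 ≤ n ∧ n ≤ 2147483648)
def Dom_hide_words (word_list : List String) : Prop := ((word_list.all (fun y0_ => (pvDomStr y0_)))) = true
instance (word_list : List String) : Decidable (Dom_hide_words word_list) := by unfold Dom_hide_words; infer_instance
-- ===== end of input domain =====

-- B replaces A's copy-then-mutate index loops by one enumerate comprehension masking each later word in closed form (objective: simpler).


-- ===== PORT A =====
-- inner 'while index <= len(blank_word) - 1' loop: mutates blank_word[index] := '_' and
-- re-assigns new_list[word+1] = "".join(blank_word) on every iteration
def hideInnerA (blank : List Char) (newList : List String) (pos : Nat) (index : Nat) :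
    List String :=
  if _h : (index : Int) ≤ (blank.length : Int) - 1 then
    let blank' := blank.set index '_'
    hideInnerA blank' (newList.set pos (String.mk blank')) pos (index + 1)
  else newList
termination_by blank.length - index
decreasing_by simp; omega

-- outer 'while word < len(word_list)-1' loop (word_list[word+1] is always in range under the guard)
def hideOuterA (wordList : List String) (newList : List String) (word : Nat) : List String :=
  if _h : (word : Int) < (wordList.length : Int) - 1 then
    let blank := (wordList.getD (word + 1) "").toList
    hideOuterA wordList (hideInnerA blank newList (word + 1) 1) (word + 1)
  else newList
termination_by wordList.length - word
decreasing_by omega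

def hide_words (word_list : List String) : List String :=
  hideOuterA word_list word_list 0

-- ===== PORT B =====
-- [w if i == 0 else w[:1] + "_" * (len(w) - 1) for i, w in enumerate(word_list)]
def hide_words_alt (word_list : List String) : List String :=
  (PySem.List.enumerate word_list).map (fun iw =>
    if iw.1 = 0 then iw.2
    else String.mk (iw.2.toList.take 1 ++ List.replicate (iw.2.toList.length - 1) '_'))

-- ===== PRECONDITION & SPEC =====
def Spec_hide_words (word_list : List String) (out : List String) : Prop := out = hide_words_alt word_list
instance (word_list : List String) (out : List String) : Decidable (Spec_hide_words word_list out) := by unfold Spec_hide_words; infer_instance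

-- ===== CLAIM (what is proved, stated in full; the proofs are below) =====
def Claim_equal_hide_words : Prop := ∀ (word_list : List String), Dom_hide_words word_list → Spec_hide_words word_list (hide_words word_list)

-- ===== LEMMAS AND PROOFS =====

def maskStr (w : String) : String :=
  String.mk (w.toList.take 1 ++ List.replicate (w.toList.length - 1) '_')

theorem set_take_succ {α : Type} (l : List α) (i : Nat) (a : α) (h : i < l.length) :
    (l.set i a).take (i + 1) = l.take i ++ [a] := by
  induction l generalizing i with
  | nil => simp at h
  | cons x xs ih =>
    cases i with
    | zero => simp
    | succ j => simp [List.set, List.take_succ_cons, ih j (by simpa using h)]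

theorem hideInnerA_eq (blank : List Char) (newList : List String) (pos index : Nat)
    (h : index < blank.length) :
    hideInnerA blank newList pos index =
      newList.set pos (String.mk (blank.take index ++ List.replicate (blank.length - index) '_')) := by
  rw [hideInnerA]
  have hg : (index : Int) ≤ (blank.length : Int) - 1 := by omega
  rw [dif_pos hg]
  by_cases h2 : index + 1 < (blank.set index '_').length
  · rw [hideInnerA_eq _ _ _ _ h2]
    rw [List.set_set]
    congr 2
    rw [set_take_succ _ _ _ h]
    have hlen : (blank.set index '_').length = blank.length := by simp
    rw [hlen]
    have : blank.length - index = (blank.length - (index + 1)) + 1 := by omega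
    rw [this, List.append_assoc]
    congr 1
  · rw [hideInnerA]
    have hlen : (blank.set index '_').length = blank.length := by simp
    rw [dif_neg (by simp only [hlen]; omega)]
    congr 1
    have hend : blank.length = index + 1 := by omega
    have : blank.set index '_' = (blank.set index '_').take (index + 1) := by
      rw [List.take_of_length_le (by omega)]
    rw [this, set_take_succ _ _ _ h]
    congr 1
    rw [hend]
    simp
termination_by blank.length - index
decreasing_by simp; omega

theorem hideInnerA_one (w : String) (newList : List String) (pos : Nat) :
    hideInnerA w.toList newList pos 1 =
      if 2 ≤ w.toList.length then newList.set pos (maskStr w) else newList := by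
  by_cases h : 2 ≤ w.toList.length
  · rw [if_pos h, hideInnerA_eq _ _ _ _ (by omega)]
    rfl
  · rw [if_neg h, hideInnerA]
    rw [dif_neg (by omega)]

theorem maskStr_short (w : String) (h : w.toList.length ≤ 1) : maskStr w = w := by
  unfold maskStr
  have h1 : w.toList.length - 1 = 0 := by omega
  rw [h1, List.take_of_length_le h, List.replicate_zero, List.append_nil]
  simp [String.mk]

theorem hideOuterA_eq (wordList : List String) : ∀ (word : Nat) (newList : List String),
    newList.length = wordList.length →
    (∀ j : Nat, word < j → newList[j]? = wordList[j]?) →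
    hideOuterA wordList newList word =
      newList.take (word + 1) ++ (wordList.drop (word + 1)).map maskStr := by
  intro word newList hlen hagree
  rw [hideOuterA]
  by_cases hg : (word : Int) < (wordList.length : Int) - 1
  · rw [dif_pos hg]
    have hwr : word + 1 < wordList.length := by omega
    set w := wordList.getD (word + 1) "" with hw
    have hget : wordList[word + 1]? = some w := by
      rw [hw, List.getD_eq_getElem?_getD, List.getElem?_eq_getElem hwr]; rfl
    set nl' := hideInnerA w.toList newList (word + 1) 1 with hnl'
    have hnl'eq : nl' = if 2 ≤ w.toList.length then newList.set (word + 1) (maskStr w) else newList :=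
      hideInnerA_one w newList (word + 1)
    have hlen' : nl'.length = wordList.length := by
      rw [hnl'eq]; split <;> simp [hlen]
    have hagree' : ∀ j : Nat, word + 1 < j → nl'[j]? = wordList[j]? := by
      intro j hj
      rw [hnl'eq]
      split
      · rw [List.getElem?_set_ne (by omega)]; exact hagree j (by omega)
      · exact hagree j (by omega)
    rw [hideOuterA_eq wordList (word + 1) nl' hlen' hagree']
    -- nl'.take (word+2) = newList.take (word+1) ++ [maskStr w]
    have hmask : nl'[word + 1]? = some (maskStr w) := by
      rw [hnl'eq]
      split
      · rw [List.getElem?_set_self (by omega : word + 1 < newList.length)]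
      · rw [hagree (word + 1) (by omega), hget, maskStr_short w (by omega)]
    have htake : nl'.take (word + 1 + 1) = newList.take (word + 1) ++ [maskStr w] := by
      rw [List.take_succ, hmask]
      simp only [Option.toList_some]
      congr 1
      apply List.ext_getElem?
      intro j
      by_cases hj : j < word + 1
      · rw [List.getElem?_take_of_lt hj, List.getElem?_take_of_lt hj]
        rw [hnl'eq]
        split
        · rw [List.getElem?_set_ne (by omega)]
        · rfl
      · rw [List.getElem?_eq_none (by simp [List.length_take]; omega),
              List.getElem?_eq_none (by simp [List.length_take]; omega)]
    rw [htake, List.append_assoc]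
    congr 1
    have hdrop : wordList.drop (word + 1) = w :: wordList.drop (word + 1 + 1) := by
      rw [List.drop_eq_getElem_cons hwr]
      congr 1
      have := hget
      rw [List.getElem?_eq_getElem hwr] at this
      exact Option.some_injective _ this
    rw [hdrop]
    simp
  · rw [dif_neg hg]
    have h1 : wordList.length ≤ word + 1 := by omega
    rw [List.drop_eq_nil_of_le h1, List.map_nil, List.append_nil,
        List.take_of_length_le (by omega)]
termination_by word => wordList.length - word
decreasing_by omega

theorem hide_words_alt_eq (word_list : List String) :
    hide_words_alt word_list = word_list.take 1 ++ (word_list.drop 1).map maskStr := by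
  unfold hide_words_alt
  cases word_list with
  | nil => rfl
  | cons x xs =>
    rw [PySem.List.enumerate_cons]
    simp only [List.map_cons, List.take_succ_cons, List.take_zero, List.drop_succ_cons,
      List.drop_zero, List.singleton_append]
    congr 1
    have : ∀ (s : Int), 1 ≤ s → (PySem.List.enumerate xs s).map (fun iw =>
        if iw.1 = 0 then iw.2
        else String.mk (iw.2.toList.take 1 ++ List.replicate (iw.2.toList.length - 1) '_')) =
        xs.map maskStr := by
      intro s hs
      induction xs generalizing s with
      | nil => rfl
      | cons y ys ih =>
        rw [PySem.List.enumerate_cons, List.map_cons, List.map_cons,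
          if_neg (by omega), ih (s + 1) (by omega)]
        rfl
    exact this 1 (le_refl 1)

-- ===== VERDICT (by name: the statement is the Claim_ definition above) =====
theorem hide_words_spec : Claim_equal_hide_words := by
  intro wl _
  unfold Spec_hide_words hide_words
  rw [hide_words_alt_eq, hideOuterA_eq wl 0 wl rfl (fun j _ => rfl)]
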